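-- pv_equiv track=rewrite | github.com/3m-Al5walda/projects | 2.py | capitalize_second_letter
-- ===== SOURCE A (Python) =====
-- def capitalize_second_letter (input_string : str):
--    result =''
--    i =1
--    for i in range(len(input_string)):
--       if (i+1)%2 == 0:
--             result += (input_string[i].upper())
--       else:
--             result += (input_string[i])
--    return result
-- ===== SOURCE B (Python) =====
-- def capitalize_second_letter(input_string):
--     # Walk the string two characters at a time: copy the first of each pair,
--     # uppercase the second; a trailing unpaired character is copied as-is.
--     out = []
--     i = 0
--     n = len(input_string)
--     while i + 1 < n:
--         out.append(input_string[i])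
--         out.append(input_string[i + 1].upper())
--         i += 2
--     if i < n:
--         out.append(input_string[i])
--     return ''.join(out)
-- ===== Notes on version B (the rewrite author's own statement) =====
-- stated objective: simpler
-- what changed: B walks the string two characters at a time (copy one, uppercase the next, plus a trailing leftover), eliminating A's per-character parity test (i+1)%2 and its string re-concatenation in favour of a pair-step loop with a joined list.
import Mathlib
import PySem

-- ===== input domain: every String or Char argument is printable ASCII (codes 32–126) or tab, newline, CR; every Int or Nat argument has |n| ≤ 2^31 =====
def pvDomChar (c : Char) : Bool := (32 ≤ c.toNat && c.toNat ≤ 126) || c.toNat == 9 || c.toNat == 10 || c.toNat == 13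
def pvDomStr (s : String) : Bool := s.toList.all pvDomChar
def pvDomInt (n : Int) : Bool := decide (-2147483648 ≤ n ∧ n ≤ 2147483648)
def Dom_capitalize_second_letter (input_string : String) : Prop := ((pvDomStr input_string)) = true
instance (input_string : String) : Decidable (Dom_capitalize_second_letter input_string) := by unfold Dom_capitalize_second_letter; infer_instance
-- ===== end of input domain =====

-- B replaces A's per-index parity loop by a pair-step walk; equal return value on all inputs (objective: simpler).
-- ===== PORT A =====
def capitalize_second_letter (input_string : String) : String :=
  let cs : List Char := input_string.toList
  String.ofList
    ((PySem.List.pyRange 0 (cs.length : Int) 1).foldl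
      (fun result i =>
        if PySem.Int.mod (i + 1) 2 == 0 then
          result ++ [PySem.Chars.upperChar (PySem.List.pyGetD cs i ' ')]
        else
          result ++ [PySem.List.pyGetD cs i ' ']) [])

-- ===== PORT B =====
-- B's while loop consumes the characters in pairs; ported as the pair-step recursion it performs.
def pvPairStep : List Char → List Char
  | c0 :: c1 :: rest => c0 :: PySem.Chars.upperChar c1 :: pvPairStep rest
  | rest => rest

def capitalize_second_letter_alt (input_string : String) : String :=
  String.ofList (pvPairStep input_string.toList)

-- ===== PRECONDITION & SPEC =====
def Spec_capitalize_second_letter (input_string : String) (out : String) : Prop := out = capitalize_second_letter_alt input_string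
instance (input_string : String) (out : String) : Decidable (Spec_capitalize_second_letter input_string out) := by unfold Spec_capitalize_second_letter; infer_instance

-- ===== CLAIM (what is proved, stated in full; the proofs are below) =====
def Claim_equal_capitalize_second_letter : Prop := ∀ (input_string : String), Dom_capitalize_second_letter input_string → Spec_capitalize_second_letter input_string (capitalize_second_letter input_string)

-- ===== LEMMAS AND PROOFS =====
-- the loop body of A, as a function of the index
def pvBodyA (cs : List Char) (i : Int) : Char :=
  if PySem.Int.mod (i + 1) 2 == 0 then PySem.Chars.upperChar (PySem.List.pyGetD cs i ' ')
  else PySem.List.pyGetD cs i ' '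

lemma pvMod (m : Nat) : PySem.Int.mod ((m : Int) + 1) 2 = ((m + 1) % 2 : Nat) := by
  exact_mod_cast PySem.Int.mod_natCast (m + 1) 2

lemma pvAt (full : List Char) (m : Nat) (c : Char) (hc : full[m]? = some c) :
    PySem.List.pyGetD full ((m : Nat) : Int) ' ' = c := by
  simp [PySem.List.pyGetD_natCast, List.getD, hc]

lemma pvMain (full : List Char) (cs : List Char) (a : Nat) (ha : a % 2 = 0)
    (h : List.drop a full = cs) :
    (List.range cs.length).map (fun k => pvBodyA full ((a + k : Nat) : Int)) = pvPairStep cs := by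
  induction cs using pvPairStep.induct generalizing a with
  | case1 c0 c1 rest ih =>
    have h0 : full[a]? = some c0 := by
      have h' : (List.drop a full)[0]? = some c0 := by rw [h]; rfl
      rw [List.getElem?_drop] at h'; simpa using h'
    have h1 : full[a + 1]? = some c1 := by
      have h' : (List.drop a full)[1]? = some c1 := by rw [h]; rfl
      rw [List.getElem?_drop] at h'; simpa using h'
    have h2 : List.drop (a + 2) full = rest := by
      have h' : List.drop 2 (List.drop a full) = rest := by rw [h]; rfl
      rw [List.drop_drop] at h'
      simpa [Nat.add_comm] using h'
    have e0 : pvBodyA full ((a : Nat) : Int) = c0 := by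
      unfold pvBodyA
      rw [pvMod a, show (a + 1) % 2 = 1 by omega, pvAt full a c0 h0]
      simp
    have e1 : pvBodyA full ((a + 1 : Nat) : Int) = PySem.Chars.upperChar c1 := by
      unfold pvBodyA
      rw [pvMod (a + 1), show (a + 1 + 1) % 2 = 0 by omega, pvAt full (a + 1) c1 h1]
      simp
    rw [show (c0 :: c1 :: rest).length = rest.length + 1 + 1 from rfl,
      List.range_succ_eq_map, List.range_succ_eq_map]
    simp only [List.map_cons, List.map_map, Nat.add_zero]
    rw [show pvPairStep (c0 :: c1 :: rest) = c0 :: PySem.Chars.upperChar c1 :: pvPairStep rest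
      from rfl]
    refine congrArg₂ _ e0 (congrArg₂ _ e1 ?_)
    rw [← ih (a + 2) (by omega) h2]
    apply List.map_congr_left
    intro k _
    simp only [Function.comp_apply, Nat.succ_eq_add_one]
    rw [show a + (k + 1 + 1) = a + 2 + k by omega]
  | case2 rest hr =>
    match rest, hr with
    | [], _ => simp [pvPairStep]
    | [c], _ =>
      have h0 : full[a]? = some c := by
        have h' : (List.drop a full)[0]? = some c := by rw [h]; rfl
        rw [List.getElem?_drop] at h'; simpa using h'
      have e0 : pvBodyA full ((a : Nat) : Int) = c := by
        unfold pvBodyA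
        rw [pvMod a, show (a + 1) % 2 = 1 by omega, pvAt full a c h0]
        simp
      simp [pvPairStep, List.range_succ_eq_map, e0]
    | c0 :: c1 :: r, hr => exact (hr c0 c1 r rfl).elim

lemma pvTop (cs : List Char) :
    ((PySem.List.pyRange 0 (cs.length : Int) 1).foldl
      (fun result i =>
        if PySem.Int.mod (i + 1) 2 == 0 then
          result ++ [PySem.Chars.upperChar (PySem.List.pyGetD cs i ' ')]
        else
          result ++ [PySem.List.pyGetD cs i ' ']) []) = pvPairStep cs := by
  have hf : (fun (result : List Char) (i : Int) =>
      if PySem.Int.mod (i + 1) 2 == 0 then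
        result ++ [PySem.Chars.upperChar (PySem.List.pyGetD cs i ' ')]
      else
        result ++ [PySem.List.pyGetD cs i ' ']) =
      fun result i => result ++ [pvBodyA cs i] := by
    funext result i
    unfold pvBodyA
    split <;> rfl
  rw [hf, PySem.List.foldl_append_singleton_eq_map, List.nil_append,
    PySem.List.pyRange_one, List.map_map]
  have := pvMain cs cs 0 (by omega) (by simp)
  simp only [Nat.zero_add] at this
  rw [← this]
  simp

-- ===== VERDICT (by name: the statement is the Claim_ definition above) =====
theorem capitalize_second_letter_spec : Claim_equal_capitalize_second_letter := by
  intro s _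
  unfold Spec_capitalize_second_letter capitalize_second_letter capitalize_second_letter_alt
  exact congrArg String.ofList (pvTop s.toList)
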